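-- pv_equiv track=rewrite | github.com/rogue-agent1/qrcode-py | qrcode.py | display_matrix
-- ===== SOURCE A (Python) =====
-- def display_matrix(size=21):
--     """Show a QR-like pattern (finder patterns only for demo)."""
--     m = [["░"] * size for _ in range(size)]
--     # Finder patterns at corners
--     for pos in [(0,0),(0,size-7),(size-7,0)]:
--         r,c = pos
--         for i in range(7):
--             for j in range(7):
--                 if i in(0,6) or j in(0,6) or (2<=i<=4 and 2<=j<=4):
--                     if 0<=r+i<size and 0<=c+j<size: m[r+i][c+j]="█"
--     return "\n".join("".join(row) for row in m)
-- ===== SOURCE B (Python) =====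
-- def display_matrix(size=21):
--     """Show a QR-like pattern (finder patterns only for demo)."""
--     def cell(r, c):
--         for (orr, occ) in ((0, 0), (0, size - 7), (size - 7, 0)):
--             i, j = r - orr, c - occ
--             if 0 <= i < 7 and 0 <= j < 7 and (i in (0, 6) or j in (0, 6) or (2 <= i <= 4 and 2 <= j <= 4)):
--                 return "█"
--         return "░"
--     def row(r):
--         if any(0 <= r - orr < 7 for orr in (0, size - 7)):
--             return "".join(cell(r, c) for c in range(size))
--         return "░" * size
--     return "\n".join(row(r) for r in range(size))
-- ===== Notes on version B (the rewrite author's own statement) =====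
-- stated objective: faster
-- what changed: B computes each cell directly from its coordinates (membership test against the three finder-pattern origins) and emits non-finder rows as a single blank run, instead of A's init-then-overwrite mutation of a 2D matrix.
import Mathlib
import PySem

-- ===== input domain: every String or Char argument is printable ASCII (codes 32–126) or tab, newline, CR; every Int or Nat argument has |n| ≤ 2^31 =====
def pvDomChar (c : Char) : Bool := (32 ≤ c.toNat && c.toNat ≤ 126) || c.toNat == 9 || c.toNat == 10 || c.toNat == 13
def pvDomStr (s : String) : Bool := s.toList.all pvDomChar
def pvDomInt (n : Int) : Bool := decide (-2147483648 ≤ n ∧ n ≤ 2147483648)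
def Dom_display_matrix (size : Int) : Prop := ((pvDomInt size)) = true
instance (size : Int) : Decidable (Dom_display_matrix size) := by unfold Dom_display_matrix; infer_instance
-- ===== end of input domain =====

-- B computes each cell directly from its coordinates in one pass instead of A's
-- init-then-overwrite mutation of a 2D matrix, emitting non-finder rows as one blank run.

-- ===== PORT A =====
-- finder-pattern condition 'i in (0,6) or j in (0,6) or (2<=i<=4 and 2<=j<=4)'
-- (identical text in both Pythons, so shared by both ports)
def pvPat (i j : Int) : Bool :=
  (i == 0 || i == 6) || (j == 0 || j == 6) ||
    (decide (2 ≤ i) && decide (i ≤ 4) && decide (2 ≤ j) && decide (j ≤ 4))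

-- 'm[r][c] = v' (only reached under A's explicit 0<=r<size / 0<=c<size guard)
def pvSet2 (m : List (List Char)) (r c : Int) (v : Char) : List (List Char) :=
  m.set r.toNat ((m.getD r.toNat []).set c.toNat v)

-- body of A's innermost loop: the guarded write for one (pos, i, j)
def pvStepA (size : Int) (m : List (List Char)) (t : (Int × Int) × Int × Int) :
    List (List Char) :=
  if pvPat t.2.1 t.2.2 then
    if decide (0 ≤ t.1.1 + t.2.1) && decide (t.1.1 + t.2.1 < size) &&
       decide (0 ≤ t.1.2 + t.2.2) && decide (t.1.2 + t.2.2 < size) then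
      pvSet2 m (t.1.1 + t.2.1) (t.1.2 + t.2.2) '█'
    else m
  else m

def display_matrix (size : Int) : String :=
  let m0 : List (List Char) :=
    List.replicate size.toNat (List.replicate size.toNat '░')
  let m :=
    [((0 : Int), (0 : Int)), (0, size - 7), (size - 7, 0)].foldl (fun m pos =>
      (PySem.List.pyRange 0 7 1).foldl (fun m i =>
        (PySem.List.pyRange 0 7 1).foldl (fun m j => pvStepA size m (pos, i, j)) m) m) m0
  String.intercalate "\n" (m.map fun row => String.ofList row)

-- ===== PORT B =====
-- B's per-cell test: is (r,c) inside one of the three finder patterns?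
def pvCellB (size r c : Int) : Char :=
  if ([((0 : Int), (0 : Int)), (0, size - 7), (size - 7, 0)].any fun o =>
        decide (0 ≤ r - o.1) && decide (r - o.1 < 7) &&
        decide (0 ≤ c - o.2) && decide (c - o.2 < 7) && pvPat (r - o.1) (c - o.2))
  then '█' else '░'

-- B's per-row builder: only rows meeting a finder band compute cells; others are a blank run
def pvRowB (size r : Int) : String :=
  if ([(0 : Int), size - 7].any fun orr => decide (0 ≤ r - orr) && decide (r - orr < 7)) then
    String.ofList ((PySem.List.pyRange 0 size 1).map fun c => pvCellB size r c)
  else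
    String.ofList (List.replicate size.toNat '░')

def display_matrix_alt (size : Int) : String :=
  String.intercalate "\n" ((PySem.List.pyRange 0 size 1).map fun r => pvRowB size r)

-- ===== PRECONDITION & SPEC =====
def Spec_display_matrix (size : Int) (out : String) : Prop := out = display_matrix_alt size
instance (size : Int) (out : String) : Decidable (Spec_display_matrix size out) := by unfold Spec_display_matrix; infer_instance

-- ===== CLAIM (what is proved, stated in full; the proofs are below) =====
def Claim_equal_display_matrix : Prop := ∀ (size : Int), Dom_display_matrix size → Spec_display_matrix size (display_matrix size)

-- ===== LEMMAS AND PROOFS =====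

-- 'm[a][b]' read with default '░', and the shape invariant (square n×n)
def pvGd (m : List (List Char)) (a b : Nat) : Char := (m.getD a []).getD b '░'

def pvShp (n : Nat) (m : List (List Char)) : Prop :=
  m.length = n ∧ ∀ a < n, (m.getD a []).length = n

-- does the write described by t land exactly on cell (a,b)?
def pvHit (size : Int) (a b : Nat) (t : (Int × Int) × Int × Int) : Bool :=
  pvPat t.2.1 t.2.2 &&
  decide (0 ≤ t.1.1 + t.2.1) && decide (t.1.1 + t.2.1 < size) &&
  decide (0 ≤ t.1.2 + t.2.2) && decide (t.1.2 + t.2.2 < size) &&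
  decide (t.1.1 + t.2.1 = (a : Int)) && decide (t.1.2 + t.2.2 = (b : Int))

-- A's three nested loops, flattened into one list of writes
def pvOps (size : Int) : List ((Int × Int) × Int × Int) :=
  [((0 : Int), (0 : Int)), (0, size - 7), (size - 7, 0)].flatMap fun p =>
    (PySem.List.pyRange 0 7 1).flatMap fun i =>
      (PySem.List.pyRange 0 7 1).map fun j => (p, i, j)

theorem pv_foldl_flatMap {α β γ : Type} (f : β → List γ) (g : α → γ → α)
    (L : List β) (a : α) :
    (L.flatMap f).foldl g a = L.foldl (fun a b => (f b).foldl g a) a := by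
  induction L generalizing a with
  | nil => simp
  | cons x xs ih => simp [List.foldl_append, ih]

theorem pv_nested_eq_ops (size : Int) (m0 : List (List Char)) :
    [((0 : Int), (0 : Int)), (0, size - 7), (size - 7, 0)].foldl (fun m pos =>
      (PySem.List.pyRange 0 7 1).foldl (fun m i =>
        (PySem.List.pyRange 0 7 1).foldl (fun m j => pvStepA size m (pos, i, j)) m) m) m0
    = (pvOps size).foldl (pvStepA size) m0 := by
  simp [pvOps, pv_foldl_flatMap, List.foldl_map]

theorem pv_getD_set {α : Type} (m : List α) (k a : Nat) (x : α) (d : α) :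
    (m.set k x).getD a d = if k = a ∧ a < m.length then x else m.getD a d := by
  simp only [List.getD_eq_getElem?_getD, List.getElem?_set]
  split_ifs with h1 h2 h3 h4 <;> simp_all

theorem pvShp_set2 {n : Nat} {m : List (List Char)} (h : pvShp n m)
    (r c : Int) (v : Char) : pvShp n (pvSet2 m r c v) := by
  obtain ⟨hl, hr⟩ := h
  refine ⟨by simp [pvSet2, hl], fun a ha => ?_⟩
  rw [pvSet2, pv_getD_set]
  split_ifs with h1
  · have := hr r.toNat (by omega)
    simpa [List.length_set, List.getD_eq_getElem?_getD] using this
  · exact hr a ha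

theorem pvGd_set2 {n : Nat} {m : List (List Char)} (h : pvShp n m)
    {r c : Int} (hr0 : 0 ≤ r) (hr1 : r < (n : Int)) (hc0 : 0 ≤ c) (hc1 : c < (n : Int))
    (v : Char) (a b : Nat) (ha : a < n) (hb : b < n) :
    pvGd (pvSet2 m r c v) a b =
      if r = (a : Int) ∧ c = (b : Int) then v else pvGd m a b := by
  obtain ⟨hl, hrow⟩ := h
  have hlen : (m.getD r.toNat []).length = n := hrow _ (by omega)
  unfold pvGd pvSet2
  rw [pv_getD_set]
  by_cases hra : r.toNat = a
  · rw [if_pos ⟨hra, by omega⟩, pv_getD_set]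
    have hr' : r = (a : Int) := by omega
    by_cases hcb : c.toNat = b
    · rw [if_pos ⟨hcb, by rw [hlen]; exact hb⟩, if_pos ⟨hr', by omega⟩]
    · rw [if_neg (fun hh => hcb hh.1), if_neg (fun hh : r = (a : Int) ∧ c = (b : Int) => hcb (by omega))]
      rw [hra]
  · rw [if_neg (fun hh => hra hh.1),
      if_neg (fun hh : r = (a : Int) ∧ c = (b : Int) => hra (by omega))]

theorem pv_fold_char (size : Int) (n : Nat) (hn : n = size.toNat)
    (L : List ((Int × Int) × Int × Int)) (m : List (List Char)) (h : pvShp n m) :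
    pvShp n (L.foldl (pvStepA size) m) ∧
    ∀ a b, a < n → b < n →
      pvGd (L.foldl (pvStepA size) m) a b =
        (if L.any (pvHit size a b) then '█' else pvGd m a b) := by
  induction L generalizing m with
  | nil => simpa using h
  | cons t ts ih =>
    have hstep : pvShp n (pvStepA size m t) := by
      unfold pvStepA; split_ifs <;> first | exact pvShp_set2 h _ _ _ | exact h
    obtain ⟨hS, hG⟩ := ih (pvStepA size m t) hstep
    refine ⟨by simpa using hS, fun a b ha hb => ?_⟩
    rw [List.foldl_cons, hG a b ha hb]
    by_cases hts : ts.any (pvHit size a b)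
    · simp [hts]
    · simp only [List.any_cons, hts, Bool.or_false]
      by_cases hhit : pvHit size a b t
      · -- the head write lands exactly on (a,b)
        have hh := hhit
        unfold pvHit at hh
        simp only [Bool.and_eq_true, decide_eq_true_eq] at hh
        obtain ⟨⟨⟨⟨⟨⟨hpat, h1⟩, h2⟩, h3⟩, h4⟩, h5⟩, h6⟩ := hh
        simp only [hhit, if_true]
        unfold pvStepA
        have hgu : (decide (0 ≤ t.1.1 + t.2.1) && decide (t.1.1 + t.2.1 < size) &&
            decide (0 ≤ t.1.2 + t.2.2) && decide (t.1.2 + t.2.2 < size)) = true := by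
          simp only [Bool.and_eq_true, decide_eq_true_eq]
          exact ⟨⟨⟨h1, h2⟩, h3⟩, h4⟩
        rw [if_pos hpat, if_pos hgu]
        rw [pvGd_set2 h (by omega) (by omega) (by omega) (by omega) _ a b ha hb]
        simp [h5, h6]
      · -- the head write misses (a,b): the cell is unchanged
        simp only [hhit, Bool.false_eq_true, if_false]
        unfold pvStepA
        split_ifs with hp hg
        · simp only [Bool.and_eq_true, decide_eq_true_eq] at hg
          obtain ⟨⟨⟨g1, g2⟩, g3⟩, g4⟩ := hg
          rw [pvGd_set2 h (by omega) (by omega) (by omega) (by omega) _ a b ha hb]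
          have hne : ¬ (t.1.1 + t.2.1 = (a : Int) ∧ t.1.2 + t.2.2 = (b : Int)) := by
            intro ⟨e1, e2⟩
            exact hhit (by
              unfold pvHit
              simp only [Bool.and_eq_true, decide_eq_true_eq]
              exact ⟨⟨⟨⟨⟨⟨hp, g1⟩, g2⟩, g3⟩, g4⟩, e1⟩, e2⟩)
          simp [hne]
        · rfl
        · rfl

theorem pv_any_origin (size : Int) (p : Int × Int) (a b : Nat)
    (ha : (a : Int) < size) (hb : (b : Int) < size) :
    (((PySem.List.pyRange 0 7 1).flatMap fun i =>
        (PySem.List.pyRange 0 7 1).map fun j => (p, i, j)).any (pvHit size a b))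
    = (decide (0 ≤ (a : Int) - p.1) && decide ((a : Int) - p.1 < 7) &&
       decide (0 ≤ (b : Int) - p.2) && decide ((b : Int) - p.2 < 7) &&
       pvPat ((a : Int) - p.1) ((b : Int) - p.2)) := by
  rw [Bool.eq_iff_iff]
  simp only [List.any_eq_true, List.mem_flatMap, List.mem_map,
    PySem.List.mem_pyRange_one, pvHit, Bool.and_eq_true, decide_eq_true_eq]
  constructor
  · rintro ⟨x, ⟨i, ⟨hi0, hi7⟩, j, ⟨hj0, hj7⟩, rfl⟩,
      ⟨⟨⟨⟨⟨⟨hpat, h1⟩, h2⟩, h3⟩, h4⟩, h5⟩, h6⟩⟩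
    have hpat' : pvPat i j = true := hpat
    have h1' : (0 : Int) ≤ p.1 + i := h1
    have h2' : p.1 + i < size := h2
    have h3' : (0 : Int) ≤ p.2 + j := h3
    have h4' : p.2 + j < size := h4
    have h5' : p.1 + i = (a : Int) := h5
    have h6' : p.2 + j = (b : Int) := h6
    have e1 : (a : Int) - p.1 = i := by omega
    have e2 : (b : Int) - p.2 = j := by omega
    exact ⟨⟨⟨⟨by omega, by omega⟩, by omega⟩, by omega⟩, by rw [e1, e2]; exact hpat'⟩
  · rintro ⟨⟨⟨⟨c1, c2⟩, c3⟩, c4⟩, hpat⟩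
    refine ⟨(p, (a : Int) - p.1, (b : Int) - p.2),
      ⟨(a : Int) - p.1, ⟨by omega, by omega⟩,
       (b : Int) - p.2, ⟨by omega, by omega⟩, rfl⟩, ?_⟩
    exact ⟨⟨⟨⟨⟨⟨hpat, show (0 : Int) ≤ p.1 + ((a : Int) - p.1) by omega⟩,
      show p.1 + ((a : Int) - p.1) < size by omega⟩,
      show (0 : Int) ≤ p.2 + ((b : Int) - p.2) by omega⟩,
      show p.2 + ((b : Int) - p.2) < size by omega⟩,
      show p.1 + ((a : Int) - p.1) = (a : Int) by omega⟩,
      show p.2 + ((b : Int) - p.2) = (b : Int) by omega⟩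

theorem pv_cell (size : Int) (a b : Nat)
    (ha : (a : Int) < size) (hb : (b : Int) < size) :
    (if (pvOps size).any (pvHit size a b) then '█' else '░')
    = pvCellB size (a : Int) (b : Int) := by
  unfold pvOps pvCellB
  simp only [List.flatMap_cons, List.flatMap_nil, List.append_nil, List.any_append,
    List.any_cons, List.any_nil, Bool.or_false]
  rw [pv_any_origin size (0, 0) a b ha hb, pv_any_origin size (0, size - 7) a b ha hb,
    pv_any_origin size (size - 7, 0) a b ha hb]

theorem pv_shp_m0 (n : Nat) :
    pvShp n (List.replicate n (List.replicate n ('░' : Char))) := by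
  refine ⟨by simp, fun a ha => ?_⟩
  simp [List.getD_eq_getElem?_getD, List.getElem?_replicate, ha]

theorem pv_gd_m0 (n : Nat) (a b : Nat) :
    pvGd (List.replicate n (List.replicate n ('░' : Char))) a b = '░' := by
  unfold pvGd
  simp only [List.getD_eq_getElem?_getD, List.getElem?_replicate]
  split_ifs <;> simp [List.getD_eq_getElem?_getD, List.getElem?_replicate] <;> split_ifs <;> rfl

theorem pv_matrix (size : Int) :
    (pvOps size).foldl (pvStepA size)
        (List.replicate size.toNat (List.replicate size.toNat '░'))
    = (PySem.List.pyRange 0 size 1).map (fun r =>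
        (PySem.List.pyRange 0 size 1).map fun c => pvCellB size r c) := by
  obtain ⟨⟨hL, hR⟩, hG⟩ :=
    pv_fold_char size size.toNat rfl (pvOps size) _ (pv_shp_m0 size.toNat)
  apply List.ext_getElem
  · simp [hL, PySem.List.length_pyRange_one]
  · intro a h1 h2
    have ha : a < size.toNat := by omega
    have haz : (a : Int) < size := by omega
    have hrow : ((pvOps size).foldl (pvStepA size)
        (List.replicate size.toNat (List.replicate size.toNat '░')))[a].length
        = size.toNat := by
      have := hR a ha
      simpa only [List.getD_eq_getElem?_getD, List.getElem?_eq_getElem h1,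
        Option.getD_some] using this
    apply List.ext_getElem
    · simp [hrow, PySem.List.length_pyRange_one]
    · intro b hb1 hb2
      have hb : b < size.toNat := by omega
      have hbz : (b : Int) < size := by omega
      have hgd := hG a b ha hb
      rw [pv_gd_m0] at hgd
      have lhs_eq : (((pvOps size).foldl (pvStepA size)
          (List.replicate size.toNat (List.replicate size.toNat '░')))[a])[b] =
          pvGd ((pvOps size).foldl (pvStepA size)
            (List.replicate size.toNat (List.replicate size.toNat '░'))) a b := by
        unfold pvGd
        simp [List.getD_eq_getElem?_getD, List.getElem?_eq_getElem, h1, hb1]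
      rw [lhs_eq, hgd, pv_cell size a b haz hbz]
      simp [PySem.List.getElem_pyRange_one]

-- a row outside every finder band is all-blank, so pvRowB's shortcut is exact
theorem pv_rowB (size r : Int) :
    pvRowB size r
    = String.ofList ((PySem.List.pyRange 0 size 1).map fun c => pvCellB size r c) := by
  unfold pvRowB
  split_ifs with hband
  · rfl
  · have hband' : ¬ ((0 ≤ r ∧ r < 7) ∨ (0 ≤ r - (size - 7) ∧ r - (size - 7) < 7)) := by
      intro hh
      apply hband
      simp only [List.any_cons, List.any_nil, Bool.or_false, Bool.or_eq_true,
        Bool.and_eq_true, decide_eq_true_eq]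
      omega
    have hcell : ∀ c : Int, pvCellB size r c = '░' := by
      intro c
      unfold pvCellB
      split_ifs with hc
      · exfalso
        simp only [List.any_cons, List.any_nil, Bool.or_false, Bool.or_eq_true,
          Bool.and_eq_true, decide_eq_true_eq] at hc
        rcases hc with (⟨⟨⟨⟨c1, c2⟩, c3⟩, c4⟩, -⟩ | ⟨⟨⟨⟨c1, c2⟩, c3⟩, c4⟩, -⟩ |
          ⟨⟨⟨⟨c1, c2⟩, c3⟩, c4⟩, -⟩) <;> exact hband' (by omega)
      · rfl
    rw [List.map_congr_left (fun c _ => hcell c)]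
    congr 1
    simp [List.map_const', PySem.List.length_pyRange_one]

-- ===== VERDICT (by name: the statement is the Claim_ definition above) =====
theorem display_matrix_spec : Claim_equal_display_matrix := by
  intro size _
  show display_matrix size = display_matrix_alt size
  simp only [display_matrix, display_matrix_alt, pv_nested_eq_ops, pv_matrix,
    pv_rowB, List.map_map]
  rfl
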